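-- pv_equiv track=rewrite | github.com/junes7/python_algorithm | 프로그래머스/1/161989. 덧칠하기/덧칠하기.py | solution
-- ===== SOURCE A (Python) =====
-- def solution(n, m, section):
--     # 처음엔 시작점으로부터 m구간을 무조건 칠해야 하므로 결과값에 1을 설정
--     r=1
--     # 처음 값 설정
--     s=section[0]
--     for i in section:
--         '''
--         처음 구간에서 가장 오른쪽 구간을 칠할 수 있는 숫자보다
--         section 요소값이 크면 처음 값 다시 설정해주고 카운트 해줍니다.
--         '''
--         if s+m-1<i:
--             s=i
--             r+=1
--     return r
-- ===== SOURCE B (Python) =====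
-- def solution(n, m, section):
--     # Peeling: each round commits one paint stroke at the first unpainted
--     # section and discards every section that stroke covers from the whole
--     # remaining list, until nothing is left.
--     remaining = section
--     ans = 0
--     while remaining:
--         end = remaining[0] + m - 1
--         remaining = [x for x in remaining[1:] if x > end]
--         ans += 1
--     return ans
-- ===== Notes on version B (the rewrite author's own statement) =====
-- stated objective: alternative
-- what changed: Replaces A's single pass with running state (count, last stroke start) by a peeling loop that each round commits a stroke at the first remaining section and rebuilds the remaining list by filtering out everything that stroke covers; Pre_ excludes m < 1 (roller width outside the task's natural domain, the problem guarantees 1 <= m) and the empty section list on which A raises IndexError.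
-- outside the precondition, e.g. on solution(2, 0, [5, 5]): A returns 3, B returns 2
import Mathlib
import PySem

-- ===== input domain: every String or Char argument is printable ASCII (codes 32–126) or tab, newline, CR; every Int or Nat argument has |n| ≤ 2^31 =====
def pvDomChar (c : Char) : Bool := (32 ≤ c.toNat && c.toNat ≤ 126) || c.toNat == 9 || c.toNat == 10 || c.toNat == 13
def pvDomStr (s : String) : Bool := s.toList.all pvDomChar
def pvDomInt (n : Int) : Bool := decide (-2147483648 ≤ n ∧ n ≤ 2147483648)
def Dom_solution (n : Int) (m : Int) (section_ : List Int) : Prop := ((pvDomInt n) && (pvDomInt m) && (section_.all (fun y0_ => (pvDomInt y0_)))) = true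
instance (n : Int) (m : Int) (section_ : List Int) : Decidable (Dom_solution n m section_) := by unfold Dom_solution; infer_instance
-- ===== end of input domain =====

-- B replaces A's single running-state pass by a peeling loop that commits one stroke
-- per round and filters everything it covers out of the whole remaining list
-- (objective: alternative decomposition, same result on the natural domain 1 ≤ m).

-- ===== PORT A =====
-- r=1; s=section[0]; for i in section: if s+m-1<i: s=i; r+=1; return r
def solution (n : Int) (m : Int) (section_ : List Int) : Int :=
  let s0 : Int := (PySem.List.pyGet? section_ 0).getD 0  -- section[0]; none (IndexError) only on [], excluded by Pre_
  (section_.foldl (fun (p : Int × Int) i => if p.2 + m - 1 < i then (p.1 + 1, i) else p) (1, s0)).1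

-- ===== PORT B =====
-- while remaining: end = remaining[0]+m-1; remaining = [x for x in remaining[1:] if x > end]; ans += 1
def peelLoop (m : Int) (ans : Int) (remaining : List Int) : Int :=
  match remaining with
  | [] => ans
  | x :: xs => peelLoop m (ans + 1) (xs.filter (fun y => decide (x + m - 1 < y)))
termination_by remaining.length
decreasing_by
  simpa using Nat.lt_succ_of_le (List.length_filter_le _ xs.attach)

def solution_alt (n : Int) (m : Int) (section_ : List Int) : Int :=
  peelLoop m 0 section_

-- ===== PRECONDITION & SPEC =====
-- Pre_ excludes m < 1, a roller width outside the task's natural domain (the problem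
-- guarantees 1 ≤ m), and the empty section list, on which A raises IndexError.
def Pre_solution (n : Int) (m : Int) (section_ : List Int) : Prop := section_ ≠ [] ∧ 1 ≤ m
instance (n : Int) (m : Int) (section_ : List Int) : Decidable (Pre_solution n m section_) := by unfold Pre_solution; infer_instance
def pvWitness_solution : Int × Int × List Int := (8, 4, [2, 4, 6])

def Spec_solution (n : Int) (m : Int) (section_ : List Int) (out : Int) : Prop := out = solution_alt n m section_
instance (n : Int) (m : Int) (section_ : List Int) (out : Int) : Decidable (Spec_solution n m section_ out) := by unfold Spec_solution; infer_instance

-- ===== CLAIM (what is proved, stated in full; the proofs are below) =====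
def Claim_equal_solution : Prop := ∀ (n : Int) (m : Int) (section_ : List Int), Dom_solution n m section_ → Pre_solution n m section_ → Spec_solution n m section_ (solution n m section_)

-- ===== LEMMAS AND PROOFS =====

-- unfolding equations for B's well-founded loop
theorem peelLoop_nil (m ans : Int) : peelLoop m ans [] = ans := by
  conv_lhs => unfold peelLoop

theorem peelLoop_cons (m ans x : Int) (xs : List Int) :
    peelLoop m ans (x :: xs)
      = peelLoop m (ans + 1) (xs.filter (fun y => decide (x + m - 1 < y))) := by
  conv_lhs => unfold peelLoop

-- A's fold with state (count, last start) equals B's peeling loop on the list with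
-- everything reachable from the last start filtered away (requires 1 ≤ m, so that
-- stroke reaches only grow).
theorem foldA_eq_peelLoop (m : Int) (hm : 1 ≤ m) (l : List Int) :
    ∀ (r s : Int),
      (l.foldl (fun (p : Int × Int) i => if p.2 + m - 1 < i then (p.1 + 1, i) else p) (r, s)).1
        = peelLoop m r (l.filter (fun y => decide (s + m - 1 < y))) := by
  induction l with
  | nil => intro r s; simp [peelLoop_nil]
  | cons x xs ih =>
    intro r s
    by_cases h : s + m - 1 < x
    · -- A starts a new stroke at x; B keeps x as the next head and filters its cover
      rw [List.foldl_cons, if_pos h, ih (r + 1) x]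
      have hfx : (x :: xs).filter (fun y => decide (s + m - 1 < y))
          = x :: xs.filter (fun y => decide (s + m - 1 < y)) := by
        simp [List.filter_cons]; omega
      have hff : (xs.filter (fun y => decide (s + m - 1 < y))).filter
            (fun y => decide (x + m - 1 < y))
          = xs.filter (fun y => decide (x + m - 1 < y)) := by
        rw [List.filter_filter]
        apply List.filter_congr
        intro y _
        by_cases hy : x + m - 1 < y
        · simp [hy]; omega
        · simp [hy]
      rw [hfx, peelLoop_cons, hff]
    · -- x is covered by the current stroke; both sides drop it
      rw [List.foldl_cons, if_neg h, ih r s]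
      have hfx : (x :: xs).filter (fun y => decide (s + m - 1 < y))
          = xs.filter (fun y => decide (s + m - 1 < y)) := by
        simp [List.filter_cons]; omega
      rw [hfx]

-- ===== VERDICT (by name: the statement is the Claim_ definition above) =====
theorem solution_spec : Claim_equal_solution := by
  intro n m section_ _ hpre
  obtain ⟨hne, hm⟩ := hpre
  unfold Spec_solution solution solution_alt
  cases section_ with
  | nil => exact absurd rfl hne
  | cons x xs =>
    have hget : PySem.List.pyGet? (x :: xs) (0 : Int) = some x := by
      simp [PySem.List.pyGet?, PySem.List.pyIdx?]
    rw [hget]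
    simp only [Option.getD_some]
    rw [foldA_eq_peelLoop m hm (x :: xs) 1 x]
    have hx : ¬ (x + m - 1 < x) := by omega
    rw [show ((x :: xs).filter (fun y => decide (x + m - 1 < y))
          = xs.filter (fun y => decide (x + m - 1 < y))) by simp [List.filter_cons]; omega]
    rw [peelLoop_cons]
    norm_num
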